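-- pv_equiv track=rewrite | github.com/shaexys/research-digest | main.py | classify_preprints
-- ===== SOURCE A (Python) =====
-- METHODS_KEYWORDS_EHR = [
--     "electronic health record", "EHR", "EMR", "clinical informatics",
--     "real-world evidence", "real-world data", "claims data",
--     "phenotyping algorithm", "clinical note", "clinical data",
--     "multimodal", "data fusion", "integrated data",
-- ]
--
-- METHODS_KEYWORDS_WEARABLES = [
--     "wearable", "smartwatch", "smart device", "smart ring",
--     "accelerom", "actigraphy", "fitbit", "mobile sensor",
--     "sensor-based", "GPS tracking", "location tracking",
--     "sensor fusion", "multimodal sensing",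
-- ]
--
-- METHODS_KEYWORDS_AI = [
--     "machine learning", "deep learning", "artificial intelligence",
--     "natural language processing", "NLP", "large language model", "LLM",
--     "GPT", "ChatGPT", "transformer", "foundation model",
--     "neural network", "random forest", "XGBoost", "gradient boosting",
--     "predictive model", "clinical decision support",
--     "text mining", "text classification",
--     "time series", "functional data analysis",
--     "precision psychiatry", "computational psychiatry",
-- ]
--
-- METHODS_KEYWORDS_DIGIPHEN = [
--     "digital phenotyp", "ecological momentary assessment", "EMA",
--     "passive sensing", "passive data", "digital biomarker",
--     "experience sampling", "intensive longitudinal",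
--     "real-time assessment", "real-time monitoring",
--     "daily diary", "momentary data",
--     "just-in-time adaptive intervention", "JITAI",
--     "digital monitor", "behavioral monitoring",
--     "emotion recognition", "screenomics", "app usage",
-- ]
--
-- def classify_preprints(preprints: list[dict]) -> dict[str, list[dict]]:
--     """Classify preprints into methods subsections based on title/abstract.
--
--     Each preprint goes to the FIRST matching subsection (priority order).
--     Returns dict of subsection_name -> list of preprints.
--     """
--     result = {
--         "EHR": [],
--         "Wearables": [],
--         "AI/ML": [],
--         "Digital Phenotyping": [],
--     }
--
--     subsection_keywords = [
--         ("EHR", METHODS_KEYWORDS_EHR),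
--         ("Wearables", METHODS_KEYWORDS_WEARABLES),
--         ("AI/ML", METHODS_KEYWORDS_AI),
--         ("Digital Phenotyping", METHODS_KEYWORDS_DIGIPHEN),
--     ]
--
--     for preprint in preprints:
--         text = (preprint.get("title", "") + " " + preprint.get("abstract", "")).lower()
--
--         # Find first matching subsection
--         for subsection_name, keywords in subsection_keywords:
--             if any(kw.lower() in text for kw in keywords):
--                 result[subsection_name].append(preprint)
--                 break  # Only assign to first matching subsection
--
--     return result
-- ===== SOURCE B (Python) =====
-- METHODS_KEYWORDS_EHR = [
--     "electronic health record", "EHR", "EMR", "clinical informatics",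
--     "real-world evidence", "real-world data", "claims data",
--     "phenotyping algorithm", "clinical note", "clinical data",
--     "multimodal", "data fusion", "integrated data",
-- ]
--
-- METHODS_KEYWORDS_WEARABLES = [
--     "wearable", "smartwatch", "smart device", "smart ring",
--     "accelerom", "actigraphy", "fitbit", "mobile sensor",
--     "sensor-based", "GPS tracking", "location tracking",
--     "sensor fusion", "multimodal sensing",
-- ]
--
-- METHODS_KEYWORDS_AI = [
--     "machine learning", "deep learning", "artificial intelligence",
--     "natural language processing", "NLP", "large language model", "LLM",
--     "GPT", "ChatGPT", "transformer", "foundation model",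
--     "neural network", "random forest", "XGBoost", "gradient boosting",
--     "predictive model", "clinical decision support",
--     "text mining", "text classification",
--     "time series", "functional data analysis",
--     "precision psychiatry", "computational psychiatry",
-- ]
--
-- METHODS_KEYWORDS_DIGIPHEN = [
--     "digital phenotyp", "ecological momentary assessment", "EMA",
--     "passive sensing", "passive data", "digital biomarker",
--     "experience sampling", "intensive longitudinal",
--     "real-time assessment", "real-time monitoring",
--     "daily diary", "momentary data",
--     "just-in-time adaptive intervention", "JITAI",
--     "digital monitor", "behavioral monitoring",
--     "emotion recognition", "screenomics", "app usage",
-- ]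
--
-- SUBSECTION_KEYWORDS = [
--     ("EHR", METHODS_KEYWORDS_EHR),
--     ("Wearables", METHODS_KEYWORDS_WEARABLES),
--     ("AI/ML", METHODS_KEYWORDS_AI),
--     ("Digital Phenotyping", METHODS_KEYWORDS_DIGIPHEN),
-- ]
--
--
-- def classify_preprints(preprints: list[dict]) -> dict[str, list[dict]]:
--     """Classify preprints into methods subsections based on title/abstract.
--
--     Inverted nesting: subsections are the OUTER loop, in priority order; a
--     set of already-assigned preprint indices preserves first-match semantics.
--     """
--     result = {}
--     assigned = set()
--     for name, keywords in SUBSECTION_KEYWORDS: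
--         bucket = []
--         for i, preprint in enumerate(preprints):
--             if i in assigned:
--                 continue
--             text = (preprint.get("title", "") + " " + preprint.get("abstract", "")).lower()
--             if any(kw.lower() in text for kw in keywords):
--                 assigned.add(i)
--                 bucket.append(preprint)
--         result[name] = bucket
--     return result
-- ===== Notes on version B (the rewrite author's own statement) =====
-- stated objective: alternative
-- what changed: B inverts the nesting: the four subsections become the outer loop in priority order and all preprints are scanned inside each, with a set of already-assigned preprint indices replacing A's per-preprint break out of the subsection loop.
import Mathlib
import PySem

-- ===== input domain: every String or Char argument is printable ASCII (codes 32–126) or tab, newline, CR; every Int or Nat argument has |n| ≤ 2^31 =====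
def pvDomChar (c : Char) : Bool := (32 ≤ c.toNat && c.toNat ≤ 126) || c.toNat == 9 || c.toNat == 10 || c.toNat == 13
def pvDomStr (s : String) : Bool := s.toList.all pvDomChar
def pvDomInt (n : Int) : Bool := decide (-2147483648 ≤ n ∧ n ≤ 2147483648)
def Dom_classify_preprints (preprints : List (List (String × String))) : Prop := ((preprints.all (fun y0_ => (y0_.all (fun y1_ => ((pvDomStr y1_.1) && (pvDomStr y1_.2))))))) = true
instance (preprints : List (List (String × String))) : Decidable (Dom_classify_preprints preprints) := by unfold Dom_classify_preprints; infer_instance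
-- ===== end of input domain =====

-- B inverts the nesting: the four subsections are the OUTER loop in priority
-- order, the preprints the inner scan, with a set of already-assigned preprint
-- indices preserving first-match semantics (objective: alternative).

-- keyword tables (module constants, shared by both programs)
def kwEHR : List String := [
  "electronic health record", "EHR", "EMR", "clinical informatics",
  "real-world evidence", "real-world data", "claims data",
  "phenotyping algorithm", "clinical note", "clinical data",
  "multimodal", "data fusion", "integrated data"]

def kwWear : List String := [
  "wearable", "smartwatch", "smart device", "smart ring",
  "accelerom", "actigraphy", "fitbit", "mobile sensor",
  "sensor-based", "GPS tracking", "location tracking",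
  "sensor fusion", "multimodal sensing"]

def kwAI : List String := [
  "machine learning", "deep learning", "artificial intelligence",
  "natural language processing", "NLP", "large language model", "LLM",
  "GPT", "ChatGPT", "transformer", "foundation model",
  "neural network", "random forest", "XGBoost", "gradient boosting",
  "predictive model", "clinical decision support",
  "text mining", "text classification",
  "time series", "functional data analysis",
  "precision psychiatry", "computational psychiatry"]

def kwDigi : List String := [
  "digital phenotyp", "ecological momentary assessment", "EMA",
  "passive sensing", "passive data", "digital biomarker",
  "experience sampling", "intensive longitudinal",
  "real-time assessment", "real-time monitoring",
  "daily diary", "momentary data",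
  "just-in-time adaptive intervention", "JITAI",
  "digital monitor", "behavioral monitoring",
  "emotion recognition", "screenomics", "app usage"]

def pvSubsections : List (String × List String) :=
  [("EHR", kwEHR), ("Wearables", kwWear), ("AI/ML", kwAI), ("Digital Phenotyping", kwDigi)]

-- (preprint.get("title","") + " " + preprint.get("abstract","")).lower()
def pvText (p : List (String × String)) : String :=
  PySem.Str.lower (PySem.Dict.getD (PySem.Dict.mk p) "title" "" ++ " " ++
                   PySem.Dict.getD (PySem.Dict.mk p) "abstract" "")

-- any(kw.lower() in text for kw in keywords)
def pvMatches (text : String) (kws : List String) : Bool :=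
  kws.any (fun kw => PySem.Str.isIn (PySem.Str.lower kw) text)

-- ===== PORT A =====
-- the inner 'for subsection_name, keywords in subsection_keywords: … break'
def pvAssign (subs : List (String × List String))
    (result : PySem.Dict String (List (List (String × String))))
    (p : List (String × String)) (text : String) :
    PySem.Dict String (List (List (String × String))) :=
  match subs with
  | [] => result
  | (name, kws) :: rest =>
      if pvMatches text kws then result.modify name [] (· ++ [p])
      else pvAssign rest result p text

def classify_preprints (preprints : List (List (String × String))) :
    List (String × List (List (String × String))) :=
  let init : PySem.Dict String (List (List (String × String))) :=
    ((((PySem.Dict.empty.insert "EHR" []).insert "Wearables" []).insert "AI/ML" []).insert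
      "Digital Phenotyping" [])
  (preprints.foldl (fun result p => pvAssign pvSubsections result p (pvText p)) init).items

-- ===== PORT B =====
-- inner loop: 'for i, preprint in enumerate(preprints): if i in assigned: continue; …'
def pvScan (kws : List String) (xs : List (Int × List (String × String)))
    (st : PySem.Set Int × List (List (String × String))) :
    PySem.Set Int × List (List (String × String)) :=
  xs.foldl (fun st ip =>
    if PySem.Set.contains st.1 ip.1 then st
    else if pvMatches (pvText ip.2) kws then (PySem.Set.add st.1 ip.1, st.2 ++ [ip.2])
    else st) st

-- outer loop: 'for name, keywords in SUBSECTION_KEYWORDS: …; result[name] = bucket'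
def classify_preprints_alt (preprints : List (List (String × String))) :
    List (String × List (List (String × String))) :=
  let xs := PySem.List.enumerate preprints
  (pvSubsections.foldl
    (fun (st : PySem.Dict String (List (List (String × String))) × PySem.Set Int) s =>
      let r := pvScan s.2 xs (st.2, [])
      (st.1.insert s.1 r.2, r.1))
    (PySem.Dict.empty, PySem.Set.empty)).1.items

-- ===== PRECONDITION & SPEC =====
def Spec_classify_preprints (preprints : List (List (String × String))) (out : List (String × List (List (String × String)))) : Prop := out = classify_preprints_alt preprints
instance (preprints : List (List (String × String))) (out : List (String × List (List (String × String)))) : Decidable (Spec_classify_preprints preprints out) := by unfold Spec_classify_preprints; infer_instance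

-- ===== CLAIM (what is proved, stated in full; the proofs are below) =====
def Claim_equal_classify_preprints : Prop := ∀ (preprints : List (List (String × String))), Dom_classify_preprints preprints → Spec_classify_preprints preprints (classify_preprints preprints)

-- ===== LEMMAS AND PROOFS =====

-- first matching subsection of a preprint (proof-side characterisation)
def pvNext (subs : List (String × List String)) (text : String) : Option String :=
  match subs with
  | [] => none
  | (name, kws) :: rest => if pvMatches text kws then some name else pvNext rest text

def pvFirstMatch (p : List (String × String)) : Option String :=
  pvNext pvSubsections (pvText p)

def pvMk (x1 x2 x3 x4 : List (List (String × String))) :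
    PySem.Dict String (List (List (String × String))) :=
  PySem.Dict.mk [("EHR", x1), ("Wearables", x2), ("AI/ML", x3), ("Digital Phenotyping", x4)]

def pvF (name : String) (ps : List (List (String × String))) : List (List (String × String)) :=
  ps.filter (fun p => pvFirstMatch p == some name)

-- one step of A's outer loop on the 4-bucket dict
theorem pv_step (x1 x2 x3 x4 : List (List (String × String))) (p : List (String × String)) :
    pvAssign pvSubsections (pvMk x1 x2 x3 x4) p (pvText p)
      = pvMk (x1 ++ pvF "EHR" [p]) (x2 ++ pvF "Wearables" [p])
             (x3 ++ pvF "AI/ML" [p]) (x4 ++ pvF "Digital Phenotyping" [p]) := by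
  simp only [pvF, pvFirstMatch, pvSubsections, pvAssign, pvNext, pvMk, List.filter]
  by_cases h1 : pvMatches (pvText p) kwEHR <;>
  by_cases h2 : pvMatches (pvText p) kwWear <;>
  by_cases h3 : pvMatches (pvText p) kwAI <;>
  by_cases h4 : pvMatches (pvText p) kwDigi <;>
  simp [h1, h2, h3, h4, PySem.Dict.modify, PySem.Dict.insert, PySem.Dict.getD,
        PySem.Dict.get?, PySem.Dict.contains]

theorem pv_fold (ps : List (List (String × String))) (x1 x2 x3 x4 : List (List (String × String))) :
    ps.foldl (fun result p => pvAssign pvSubsections result p (pvText p)) (pvMk x1 x2 x3 x4)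
      = pvMk (x1 ++ pvF "EHR" ps) (x2 ++ pvF "Wearables" ps)
             (x3 ++ pvF "AI/ML" ps) (x4 ++ pvF "Digital Phenotyping" ps) := by
  induction ps generalizing x1 x2 x3 x4 with
  | nil => simp [pvF]
  | cons p ps ih =>
      rw [List.foldl_cons, pv_step, ih]
      simp only [pvF, List.filter_cons, List.filter_nil]
      by_cases h1 : pvFirstMatch p == some "EHR" <;>
      by_cases h2 : pvFirstMatch p == some "Wearables" <;>
      by_cases h3 : pvFirstMatch p == some "AI/ML" <;>
      by_cases h4 : pvFirstMatch p == some "Digital Phenotyping" <;>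
      simp [h1, h2, h3, h4]

-- B-side helper facts about pvScan and the assigned set
theorem pvScan_cons (kws : List String) (ip : Int × List (String × String))
    (xs : List (Int × List (String × String)))
    (st : PySem.Set Int × List (List (String × String))) :
    pvScan kws (ip :: xs) st
      = pvScan kws xs
          (if PySem.Set.contains st.1 ip.1 then st
           else if pvMatches (pvText ip.2) kws then (PySem.Set.add st.1 ip.1, st.2 ++ [ip.2])
           else st) := rfl

theorem pv_contains_add_ne (S : PySem.Set Int) {i j : Int} (h : j ≠ i) :
    PySem.Set.contains (PySem.Set.add S i) j = PySem.Set.contains S j := by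
  by_cases hm : i ∈ S
  · rw [PySem.Set.add_of_mem hm]
  · rw [PySem.Set.add_of_not_mem hm]
    simp [h]

theorem pv_contains_add_self (S : PySem.Set Int) (i : Int) :
    PySem.Set.contains (PySem.Set.add S i) i = true := by
  refine (PySem.Set.contains_iff _ _).mpr ?_
  rw [PySem.Set.mem_add]
  right; rfl

-- pvScan leaves the membership of an index that does not occur unchanged
theorem pvScan_contains_of_not_mem (kws : List String)
    (xs : List (Int × List (String × String))) (st : PySem.Set Int × List (List (String × String)))
    (j : Int) (hj : ∀ ip ∈ xs, ip.1 ≠ j) :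
    PySem.Set.contains (pvScan kws xs st).1 j = PySem.Set.contains st.1 j := by
  induction xs generalizing st with
  | nil => rfl
  | cons ip xs ih =>
      have hji : j ≠ ip.1 := Ne.symm (hj ip (by simp))
      have htail : ∀ q ∈ xs, q.1 ≠ j := fun q hq => hj q (by simp [hq])
      rw [pvScan_cons]
      split_ifs with h1 h2
      · exact ih _ htail
      · rw [ih _ htail]
        exact pv_contains_add_ne st.1 hji
      · exact ih _ htail

-- main pvScan characterisation: if membership of the assigned set on the scanned
-- indices is described by a predicate g on the preprint, the scan appends exactly
-- the unassigned matchers and updates membership to g ∨ match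
theorem pvScan_spec (kws : List String) (g : List (String × String) → Bool)
    (xs : List (Int × List (String × String)))
    (S : PySem.Set Int) (b : List (List (String × String)))
    (hnd : xs.Pairwise (fun p q => p.1 < q.1))
    (hmem : ∀ ip ∈ xs, PySem.Set.contains S ip.1 = g ip.2) :
    (pvScan kws xs (S, b)).2
        = b ++ (xs.filter (fun ip => !g ip.2 && pvMatches (pvText ip.2) kws)).map (·.2)
    ∧ ∀ ip ∈ xs, PySem.Set.contains (pvScan kws xs (S, b)).1 ip.1
        = (g ip.2 || pvMatches (pvText ip.2) kws) := by
  induction xs generalizing S b with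
  | nil => simp [pvScan]
  | cons ip xs ih =>
      have hhead : PySem.Set.contains S ip.1 = g ip.2 := hmem ip (by simp)
      have hlt : ∀ q ∈ xs, ip.1 < q.1 := (List.pairwise_cons.mp hnd).1
      have hne : ∀ q ∈ xs, q.1 ≠ ip.1 := fun q hq => (ne_of_gt (hlt q hq))
      have hndt : xs.Pairwise (fun p q => p.1 < q.1) := (List.pairwise_cons.mp hnd).2
      have hmt : ∀ q ∈ xs, PySem.Set.contains S q.1 = g q.2 :=
        fun q hq => hmem q (by simp [hq])
      rw [pvScan_cons, hhead]
      by_cases hg : g ip.2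
      · -- already assigned: skip
        rw [if_pos hg]
        obtain ⟨h2, h1⟩ := ih S b hndt hmt
        constructor
        · rw [h2, List.filter_cons]
          simp only [hg, Bool.not_true, Bool.false_and, Bool.false_eq_true, if_false]
        · intro q hq
          rcases List.mem_cons.mp hq with rfl | hq'
          · rw [pvScan_contains_of_not_mem kws xs (S, b) q.1 hne, hhead, hg]
            simp
          · exact h1 q hq'
      · rw [if_neg (by simp [hg])]
        by_cases hm : pvMatches (pvText ip.2) kws
        · -- assign: add the index, append the preprint
          rw [if_pos hm]
          have hmt' : ∀ q ∈ xs, PySem.Set.contains (PySem.Set.add S ip.1) q.1 = g q.2 :=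
            fun q hq => by rw [pv_contains_add_ne S (hne q hq)]; exact hmt q hq
          obtain ⟨h2, h1⟩ := ih (PySem.Set.add S ip.1) (b ++ [ip.2]) hndt hmt'
          constructor
          · rw [h2, List.filter_cons]
            simp only [hg, hm, Bool.not_false, Bool.true_and, if_true, List.map_cons,
                       List.append_assoc, List.singleton_append]
          · intro q hq
            rcases List.mem_cons.mp hq with rfl | hq'
            · rw [pvScan_contains_of_not_mem kws xs _ q.1 hne,
                  pv_contains_add_self S q.1]
              simp [hm]
            · exact h1 q hq'
        · -- no match: skip
          rw [if_neg hm]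
          obtain ⟨h2, h1⟩ := ih S b hndt hmt
          constructor
          · rw [h2, List.filter_cons]
            simp only [hm, Bool.and_false, Bool.false_eq_true, if_false]
          · intro q hq
            rcases List.mem_cons.mp hq with rfl | hq'
            · rw [pvScan_contains_of_not_mem kws xs (S, b) q.1 hne, hhead]
              simp [hg, hm]
            · exact h1 q hq'

-- a filter on the preprint component commutes with enumerate
theorem pv_filter_enumerate (f : List (String × String) → Bool)
    (ps : List (List (String × String))) (s : Int) :
    ((PySem.List.enumerate ps s).filter (fun ip => f ip.2)).map (·.2) = ps.filter f := by
  induction ps generalizing s with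
  | nil => rfl
  | cons p ps ih =>
      rw [PySem.List.enumerate_cons, List.filter_cons]
      by_cases h : f p <;> simp [h, ih]

-- the per-subsection filters of B equal the first-match filters of A
theorem pv_bucket_eq (ps : List (List (String × String))) :
    ps.filter (fun p => !false && pvMatches (pvText p) kwEHR) = pvF "EHR" ps
  ∧ ps.filter (fun p => !(pvMatches (pvText p) kwEHR) && pvMatches (pvText p) kwWear)
      = pvF "Wearables" ps
  ∧ ps.filter (fun p => !(pvMatches (pvText p) kwEHR || pvMatches (pvText p) kwWear)
        && pvMatches (pvText p) kwAI) = pvF "AI/ML" ps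
  ∧ ps.filter (fun p => !((pvMatches (pvText p) kwEHR || pvMatches (pvText p) kwWear)
        || pvMatches (pvText p) kwAI) && pvMatches (pvText p) kwDigi)
      = pvF "Digital Phenotyping" ps := by
  refine ⟨?_, ?_, ?_, ?_⟩ <;>
  · unfold pvF
    apply List.filter_congr
    intro p _
    by_cases h1 : pvMatches (pvText p) kwEHR <;>
    by_cases h2 : pvMatches (pvText p) kwWear <;>
    by_cases h3 : pvMatches (pvText p) kwAI <;>
    by_cases h4 : pvMatches (pvText p) kwDigi <;>
    simp [pvFirstMatch, pvNext, pvSubsections, h1, h2, h3, h4]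

-- assembling the result dict of B gives the four buckets in order
theorem pv_items (b1 b2 b3 b4 : List (List (String × String))) :
    ((((PySem.Dict.empty.insert "EHR" b1).insert "Wearables" b2).insert "AI/ML" b3).insert
        "Digital Phenotyping" b4).items
      = [("EHR", b1), ("Wearables", b2), ("AI/ML", b3), ("Digital Phenotyping", b4)] := by
  simp [PySem.Dict.empty, PySem.Dict.insert, PySem.Dict.contains]

-- ===== VERDICT (by name: the statement is the Claim_ definition above) =====
theorem classify_preprints_spec : Claim_equal_classify_preprints := by
  intro ps _
  unfold Spec_classify_preprints classify_preprints classify_preprints_alt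
  -- A's side: the fold is the four first-match filters
  have hinit : ((((PySem.Dict.empty.insert "EHR" ([] : List (List (String × String)))).insert "Wearables" []).insert "AI/ML" []).insert "Digital Phenotyping" []) = pvMk [] [] [] [] := by
    decide
  -- B's side: apply pvScan_spec four times in sequence
  set xs := PySem.List.enumerate ps with hxs
  have hnd : xs.Pairwise (fun p q => p.1 < q.1) := PySem.List.pairwise_lt_enumerate ps 0
  have h0 : ∀ ip ∈ xs, PySem.Set.contains (PySem.Set.empty : PySem.Set Int) ip.1
      = (fun (_ : List (String × String)) => false) ip.2 := by
    intro ip _; simp [PySem.Set.empty, PySem.Set.contains_eq_listContains]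
  obtain ⟨e1, m1⟩ := pvScan_spec kwEHR (fun _ => false) xs PySem.Set.empty [] hnd h0
  obtain ⟨e2, m2⟩ := pvScan_spec kwWear
    (fun p => false || pvMatches (pvText p) kwEHR) xs _ [] hnd m1
  obtain ⟨e3, m3⟩ := pvScan_spec kwAI
    (fun p => (false || pvMatches (pvText p) kwEHR) || pvMatches (pvText p) kwWear) xs _ [] hnd m2
  obtain ⟨e4, _⟩ := pvScan_spec kwDigi
    (fun p => ((false || pvMatches (pvText p) kwEHR) || pvMatches (pvText p) kwWear)
      || pvMatches (pvText p) kwAI) xs _ [] hnd m3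
  rw [hinit]
  dsimp only
  rw [pv_fold]
  simp only [pvSubsections, List.foldl_cons, List.foldl_nil]
  simp only [List.nil_append] at e1 e2 e3 e4 ⊢
  rw [e1, e2, e3, e4]
  simp only [Bool.not_false, Bool.false_or, Bool.true_and] at *
  rw [hxs]
  rw [pv_filter_enumerate (fun p => pvMatches (pvText p) kwEHR) ps 0,
      pv_filter_enumerate (fun p => !pvMatches (pvText p) kwEHR && pvMatches (pvText p) kwWear) ps 0,
      pv_filter_enumerate (fun p => !(pvMatches (pvText p) kwEHR || pvMatches (pvText p) kwWear) && pvMatches (pvText p) kwAI) ps 0,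
      pv_filter_enumerate (fun p => !(pvMatches (pvText p) kwEHR || pvMatches (pvText p) kwWear || pvMatches (pvText p) kwAI) && pvMatches (pvText p) kwDigi) ps 0]
  obtain ⟨b1, b2, b3, b4⟩ := pv_bucket_eq ps
  simp only [Bool.not_false, Bool.true_and] at b1
  rw [b1, b2, b3, b4, pv_items]
  rfl
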